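-- pv_equiv track=rewrite | github.com/difangu/CourseProject | annotation/pattern_decipher.py | extract_sublist
-- ===== SOURCE A (Python) =====
-- def extract_sublist(school_list):
--     another_list = list()
--     for i in range(0, len(school_list)):
--         some_list = school_list[i].split()
--         tmp_list = list()
--         for i in some_list:
--             if i != '#SUP:':
--                 tmp_list.append(int(i))
--             elif i == '#SUP:':
--                 another_list.append(tmp_list)
--                 break
--     return another_list
-- ===== SOURCE B (Python) =====
-- def extract_sublist(school_list):
--     another_list = []
--     for line in school_list:
--         tokens = line.split()
--         idx = tokens.index('#SUP:') if '#SUP:' in tokens else len(tokens)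
--         values = [int(x) for x in tokens[:idx]]
--         if idx < len(tokens):
--             another_list.append(values)
--     return another_list
-- ===== Notes on version B (the rewrite author's own statement) =====
-- stated objective: simpler
-- what changed: B replaces A's token-by-token accumulate-with-sentinel-and-break loop by a two-phase locate-then-convert step per line: find the '#SUP:' marker position with membership/index (falling back to the token count), convert the prefix slice in one comprehension, and append it only when the marker was found.
import Mathlib
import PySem

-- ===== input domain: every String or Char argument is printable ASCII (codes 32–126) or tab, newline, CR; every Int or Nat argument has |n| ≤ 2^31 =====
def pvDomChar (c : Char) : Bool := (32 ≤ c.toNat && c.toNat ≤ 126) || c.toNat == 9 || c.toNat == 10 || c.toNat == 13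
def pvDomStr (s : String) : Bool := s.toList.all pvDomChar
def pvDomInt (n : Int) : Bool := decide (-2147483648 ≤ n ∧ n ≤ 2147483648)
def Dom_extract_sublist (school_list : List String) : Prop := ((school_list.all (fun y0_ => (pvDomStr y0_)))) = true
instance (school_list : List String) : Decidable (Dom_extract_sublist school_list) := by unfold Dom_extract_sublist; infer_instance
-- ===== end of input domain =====

-- B replaces A's accumulate-with-sentinel-and-break token loop by a locate-the-marker
-- (membership + index) phase followed by a convert-the-prefix-slice phase (objective: simpler).


-- int(t); within Pre_ every converted token parses, so the default 0 is never the value used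
def pvIntTok (t : String) : Int := (PySem.Int.ofStr? t).getD 0

-- ===== PORT A =====
-- A's inner loop: append int(i) for i ≠ '#SUP:', on '#SUP:' append tmp_list and break
def pvLoopA : List String → List Int → List (List Int) → List (List Int)
  | [], _, acc => acc
  | t :: rest, tmp, acc =>
    if t ≠ "#SUP:" then pvLoopA rest (tmp ++ [pvIntTok t]) acc
    else acc ++ [tmp]

def extract_sublist (school_list : List String) : List (List Int) :=
  school_list.foldl (fun acc s => pvLoopA (PySem.Str.split₀ s) [] acc) []

-- ===== PORT B =====
def extract_sublist_alt (school_list : List String) : List (List Int) :=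
  school_list.foldl (fun acc line =>
    let tokens := PySem.Str.split₀ line
    let idx := if "#SUP:" ∈ tokens then (PySem.List.index? tokens "#SUP:").getD tokens.length
               else tokens.length
    let values := (PySem.List.slice tokens none (some (idx : Int))).map pvIntTok
    if idx < tokens.length then acc ++ [values] else acc) []

-- ===== PRECONDITION & SPEC =====
-- Pre_ excludes exactly the inputs on which both Pythons raise ValueError: some line has a
-- non-int token among the tokens before its first '#SUP:' (or anywhere, if it has no marker).
def Pre_extract_sublist (school_list : List String) : Prop :=
  ∀ s ∈ school_list, ∀ t ∈ (PySem.Str.split₀ s).takeWhile (· ≠ "#SUP:"),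
    (PySem.Int.ofStr? t).isSome = true
instance (school_list : List String) : Decidable (Pre_extract_sublist school_list) := by
  unfold Pre_extract_sublist; infer_instance

def pvWitness_extract_sublist : List String := ["1 2 #SUP: 3", "#SUP:"]

def Spec_extract_sublist (school_list : List String) (out : List (List Int)) : Prop :=
  out = extract_sublist_alt school_list
instance (school_list : List String) (out : List (List Int)) : Decidable (Spec_extract_sublist school_list out) := by unfold Spec_extract_sublist; infer_instance

-- ===== CLAIM (what is proved, stated in full; the proofs are below) =====
def Claim_equal_extract_sublist : Prop := ∀ (school_list : List String), Dom_extract_sublist school_list → Pre_extract_sublist school_list → Spec_extract_sublist school_list (extract_sublist school_list)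

-- ===== LEMMAS AND PROOFS =====

-- A's break loop, characterised: it appends tmp ++ converted prefix iff the marker occurs.
lemma pvLoopA_char (toks : List String) : ∀ (tmp : List Int) (acc : List (List Int)),
    pvLoopA toks tmp acc =
      if "#SUP:" ∈ toks then
        acc ++ [tmp ++ (toks.takeWhile (· ≠ "#SUP:")).map pvIntTok]
      else acc := by
  induction toks with
  | nil => intro tmp acc; simp [pvLoopA]
  | cons t rest ih =>
    intro tmp acc
    by_cases ht : t = "#SUP:"
    · subst ht; simp [pvLoopA]
    · simp [pvLoopA, ht, Ne.symm ht, ih, List.mem_cons]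

-- locate-then-slice equals the takeWhile prefix when the marker occurs
lemma index_slice_takeWhile (toks : List String) (h : "#SUP:" ∈ toks) :
    ∃ idx, PySem.List.index? toks "#SUP:" = some idx ∧
      PySem.List.slice toks none (some (idx : Int)) = toks.takeWhile (· ≠ "#SUP:") := by
  induction toks with
  | nil => cases h
  | cons t rest ih =>
    by_cases ht : t = "#SUP:"
    · subst ht
      refine ⟨0, PySem.List.index?_cons_self _ _, ?_⟩
      rw [PySem.List.slice_to_natCast]
      simp [List.takeWhile_cons]
    · have hmem : "#SUP:" ∈ rest := by
        rcases List.mem_cons.1 h with h' | h'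
        · exact absurd h'.symm ht
        · exact h'
      obtain ⟨idx, hidx, hsl⟩ := ih hmem
      refine ⟨idx + 1, ?_, ?_⟩
      · rw [PySem.List.index?_cons_of_ne rest ht, hidx]; rfl
      · rw [PySem.List.slice_to_natCast] at hsl ⊢
        rw [List.take_succ_cons, hsl]
        simp [List.takeWhile_cons, ht]

-- the two per-line step functions agree
lemma step_eq (acc : List (List Int)) (s : String) :
    pvLoopA (PySem.Str.split₀ s) [] acc =
      (let tokens := PySem.Str.split₀ s
       let idx := if "#SUP:" ∈ tokens then (PySem.List.index? tokens "#SUP:").getD tokens.length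
                  else tokens.length
       let values := (PySem.List.slice tokens none (some (idx : Int))).map pvIntTok
       if idx < tokens.length then acc ++ [values] else acc) := by
  by_cases h : "#SUP:" ∈ PySem.Str.split₀ s
  · obtain ⟨idx, hidx, hsl⟩ := index_slice_takeWhile _ h
    obtain ⟨hk, -, -⟩ := PySem.List.getElem_of_index?_eq_some hidx
    rw [pvLoopA_char, if_pos h]
    simp only [if_pos h, hidx, Option.getD_some, hsl, if_pos hk]
    simp
  · rw [pvLoopA_char, if_neg h]
    simp [h]

-- ===== VERDICT (by name: the statement is the Claim_ definition above) =====
theorem extract_sublist_spec : Claim_equal_extract_sublist := by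
  intro school_list _ _
  unfold Spec_extract_sublist extract_sublist extract_sublist_alt
  induction school_list using List.reverseRecOn with
  | nil => rfl
  | append_singleton l s ih => simp only [List.foldl_append, List.foldl_cons, List.foldl_nil, ih, step_eq]
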